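-- pv_equiv track=rewrite | github.com/maksimdrachov/matrix_display | src/matrix_display/rendering.py | _glyph_bounds
-- ===== SOURCE A (Python) =====
-- def _glyph_bounds(rows: tuple[str, ...]) -> tuple[int, int]:
--     active_columns = [
--         column
--         for column in range(len(rows[0]))
--         if any(row[column] == "1" for row in rows)
--     ]
--     if not active_columns:
--         return 0, 3
--     left = min(active_columns)
--     right = max(active_columns)
--     return left, right - left + 1
-- ===== SOURCE B (Python) =====
-- def _glyph_bounds(rows: tuple[str, ...]) -> tuple[int, int]:
--     width = len(rows[0])
--     left = None
--     for column in range(width):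
--         if any(row[column] == "1" for row in rows):
--             left = column
--             break
--     if left is None:
--         return 0, 3
--     for column in range(width - 1, -1, -1):
--         if any(row[column] == "1" for row in rows):
--             return left, column - left + 1
-- ===== Notes on version B (the rewrite author's own statement) =====
-- stated objective: alternative
-- what changed: Replaces build-the-whole-active-column-list-then-min/max with two opposite-direction early-exit scans: a left-to-right scan breaking at the first active column and a right-to-left scan breaking at the last one.
import Mathlib
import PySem

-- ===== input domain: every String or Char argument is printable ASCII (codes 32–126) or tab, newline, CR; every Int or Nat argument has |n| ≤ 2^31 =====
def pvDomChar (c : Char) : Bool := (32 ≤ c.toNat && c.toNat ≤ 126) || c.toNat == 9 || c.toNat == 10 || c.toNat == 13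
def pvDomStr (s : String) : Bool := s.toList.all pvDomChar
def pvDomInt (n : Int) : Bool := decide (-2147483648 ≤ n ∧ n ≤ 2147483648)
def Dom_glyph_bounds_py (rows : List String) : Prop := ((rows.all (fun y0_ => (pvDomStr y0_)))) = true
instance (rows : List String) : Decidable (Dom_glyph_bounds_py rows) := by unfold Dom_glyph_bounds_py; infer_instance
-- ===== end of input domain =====

-- B replaces the build-list-then-min/max strategy with two opposite-direction early-exit
-- scans for the first and last active column (alternative decomposition, same cost).

-- any(row[column] == "1" for row in rows)  — shared by both ports, inline in both Pythons
def pvActive (rows : List String) (column : Int) : Bool :=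
  rows.any (fun row => PySem.Str.pyGet? row column == some '1')

-- ===== PORT A =====
def glyph_bounds_py (rows : List String) : Int × Int :=
  match PySem.List.pyGet? rows 0 with
  | none => (0, 3)  -- Python raises IndexError on rows[0]; excluded by Pre_
  | some r0 =>
    let active_columns :=
      (PySem.List.pyRange 0 (PySem.Str.len r0) 1).filter (fun c => pvActive rows c)
    if active_columns.isEmpty then (0, 3)
    else
      match PySem.List.min? active_columns (fun x => x),
            PySem.List.max? active_columns (fun x => x) with
      | some left, some right => (left, right - left + 1)
      | _, _ => (0, 3)  -- unreachable: the list is nonempty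

-- ===== PORT B =====
def glyph_bounds_py_alt (rows : List String) : Int × Int :=
  match rows with
  | [] => (0, 3)  -- Python raises IndexError on rows[0]; excluded by Pre_
  | r0 :: _ =>
    let width := PySem.Str.len r0
    match (PySem.List.pyRange 0 width 1).find? (fun c => pvActive rows c) with
    | none => (0, 3)
    | some left =>
      match (PySem.List.pyRange (width - 1) (-1) (-1)).find? (fun c => pvActive rows c) with
      | none => (0, 3)  -- unreachable: some column is active
      | some right => (left, right - left + 1)

-- ===== PRECONDITION & SPEC =====
-- Pre_ is exactly the inputs on which Python A returns: rows is nonempty and, for every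
-- column of rows[0] and every too-short row, some earlier row already has '1' there
-- (any()'s short-circuit), so no row[column] access is out of range.
def Pre_glyph_bounds_py (rows : List String) : Prop :=
  rows ≠ [] ∧
  ∀ c ∈ PySem.List.pyRange 0 (PySem.Str.len (rows.headD "")) 1,
    ∀ i ∈ List.range rows.length,
      PySem.Str.len (rows.getD i "") ≤ c →
        ∃ j ∈ List.range i, PySem.Str.pyGet? (rows.getD j "") c = some '1'
instance (rows : List String) : Decidable (Pre_glyph_bounds_py rows) := by
  unfold Pre_glyph_bounds_py; infer_instance
def pvWitness_glyph_bounds_py : List String := ["010", "110"]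

def Spec_glyph_bounds_py (rows : List String) (out : Int × Int) : Prop := out = glyph_bounds_py_alt rows
instance (rows : List String) (out : Int × Int) : Decidable (Spec_glyph_bounds_py rows out) := by unfold Spec_glyph_bounds_py; infer_instance

-- ===== CLAIM (what is proved, stated in full; the proofs are below) =====
def Claim_equal_glyph_bounds_py : Prop := ∀ (rows : List String), Dom_glyph_bounds_py rows → Pre_glyph_bounds_py rows → Spec_glyph_bounds_py rows (glyph_bounds_py rows)

-- ===== LEMMAS AND PROOFS =====

-- foldl min over a list everything of which is ≥ x returns x
theorem pv_foldl_min_eq (t : List Int) (x : Int) (h : ∀ y ∈ t, x ≤ y) :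
    t.foldl min x = x := by
  induction t generalizing x with
  | nil => rfl
  | cons a t ih =>
    simp only [List.foldl_cons]
    have hxa : min x a = x := min_eq_left (h a (by simp))
    rw [hxa]
    exact ih x (fun y hy => h y (by simp [hy]))

-- foldl max over a ≤-chain returns the last element
theorem pv_foldl_max_eq (t : List Int) (x : Int) (h : (x :: t).Pairwise (· ≤ ·)) :
    t.foldl max x = (x :: t).getLast (by simp) := by
  induction t generalizing x with
  | nil => rfl
  | cons a t ih =>
    simp only [List.foldl_cons]
    have hxa : max x a = a := max_eq_right (List.rel_of_pairwise_cons h (by simp))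
    rw [hxa, List.getLast_cons (by simp)]
    exact ih a h.tail

-- find? is the head of the filtered list
theorem pv_find?_eq_head?_filter {α : Type} (p : α → Bool) (l : List α) :
    l.find? p = (l.filter p).head? := by
  induction l with
  | nil => rfl
  | cons a l ih =>
    by_cases h : p a
    · rw [List.find?_cons_of_pos h, List.filter_cons_of_pos h]; rfl
    · rw [List.find?_cons_of_neg h, List.filter_cons_of_neg h]; exact ih

-- the core equality: build-filter-then-min/max = head/last lookups, for any <-chain L
theorem pv_main (P : Int → Bool) (L : List Int) (hL : L.Pairwise (· < ·)) :
    (if (L.filter P).isEmpty then ((0 : Int), (3 : Int))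
     else
       match PySem.List.min? (L.filter P) (fun x => x),
             PySem.List.max? (L.filter P) (fun x => x) with
       | some left, some right => (left, right - left + 1)
       | _, _ => ((0 : Int), (3 : Int))) =
    (match L.find? P with
     | none => ((0 : Int), (3 : Int))
     | some left =>
       match L.reverse.find? P with
       | none => ((0 : Int), (3 : Int))
       | some right => (left, right - left + 1)) := by
  have hfindL : L.find? P = (L.filter P).head? := pv_find?_eq_head?_filter P L
  have hfindR : L.reverse.find? P = (L.filter P).getLast? := by
    rw [pv_find?_eq_head?_filter, List.filter_reverse, List.head?_reverse]
  have hchain : (L.filter P).Pairwise (· ≤ ·) :=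
    (hL.filter P).imp (fun h => le_of_lt h)
  cases hFc : L.filter P with
  | nil => rw [hfindL, hFc]; simp
  | cons m t =>
    rw [hFc] at hfindL hfindR hchain
    have hmin : PySem.List.min? (m :: t) (fun x => x) = some m := by
      rw [PySem.List.min?_id_cons,
        pv_foldl_min_eq t m (fun y hy => List.rel_of_pairwise_cons hchain hy)]
    have hmax : PySem.List.max? (m :: t) (fun x => x) =
        some ((m :: t).getLast (by simp)) := by
      rw [PySem.List.max?_id_cons, pv_foldl_max_eq t m hchain]
    have hlast : (m :: t).getLast? = some ((m :: t).getLast (by simp)) :=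
      List.getLast?_eq_some_getLast (by simp)
    rw [hfindL, hfindR] at *
    simp [hmin, hmax, hlast]

theorem glyph_bounds_py_spec : Claim_equal_glyph_bounds_py := by
  intro rows _ hpre
  obtain ⟨hne, hlen⟩ := hpre
  obtain ⟨r0, rest, rfl⟩ : ∃ r0 rest, rows = r0 :: rest := by
    cases rows with
    | nil => exact absurd rfl hne
    | cons a l => exact ⟨a, l, rfl⟩
  unfold Spec_glyph_bounds_py glyph_bounds_py glyph_bounds_py_alt
  rw [PySem.List.pyGet?_zero_cons]
  simp only []
  have hrev : PySem.List.pyRange (PySem.Str.len r0 - 1) (-1) (-1) =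
      (PySem.List.pyRange 0 (PySem.Str.len r0) 1).reverse := by
    rw [PySem.List.pyRange_neg_one_eq_reverse]
    norm_num
  rw [hrev]
  exact pv_main (fun c => pvActive (r0 :: rest) c)
    (PySem.List.pyRange 0 (PySem.Str.len r0) 1)
    (PySem.List.pairwise_lt_pyRange_one 0 (PySem.Str.len r0))
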